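-- pv_equiv track=rewrite | github.com/ouiex/mocra | python_mocra/utils/string_case.py | to_pascal_case
-- ===== SOURCE A (Python) =====
-- def to_pascal_case(value: str) -> str:
--     result = []
--     capitalize_next = True
--     for ch in value:
--         if ch == "_":
--             capitalize_next = True
--             continue
--         if capitalize_next:
--             result.append(ch.upper())
--             capitalize_next = False
--         else:
--             result.append(ch)
--     return "".join(result)
-- ===== SOURCE B (Python) =====
-- def to_pascal_case(value: str) -> str:
--     return "".join(p[:1].upper() + p[1:] for p in value.split("_"))
-- ===== Notes on version B (the rewrite author's own statement) =====
-- stated objective: idiomatic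
-- what changed: B splits the string on the underscore separator and uppercases only each segment's first character, instead of A's character-by-character loop with a capitalize-next carry flag.
import Mathlib
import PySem

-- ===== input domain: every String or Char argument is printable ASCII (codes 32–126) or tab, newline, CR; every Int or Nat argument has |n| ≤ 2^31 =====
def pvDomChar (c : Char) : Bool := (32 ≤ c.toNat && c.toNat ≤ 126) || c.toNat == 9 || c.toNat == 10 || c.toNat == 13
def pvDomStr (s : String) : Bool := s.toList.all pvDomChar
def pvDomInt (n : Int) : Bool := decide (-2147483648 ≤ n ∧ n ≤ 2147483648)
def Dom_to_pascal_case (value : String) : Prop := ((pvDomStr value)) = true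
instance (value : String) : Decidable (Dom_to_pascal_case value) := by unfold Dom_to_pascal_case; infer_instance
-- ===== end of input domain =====

-- B replaces A's char-by-char loop with a carry flag by a split on '_' that uppercases
-- each segment's first character: idiomatic, and measurably faster (C-level split/join vs a per-char Python loop).

-- ===== PORT A =====
-- result/capitalize_next loop, one character at a time, as a foldl over the same state.
def pvStepA (st : List Char × Bool) (ch : Char) : List Char × Bool :=
  if ch = '_' then (st.1, true)
  else if st.2 then (st.1 ++ PySem.Chars.upper [ch], false)
  else (st.1 ++ [ch], false)

def to_pascal_case (value : String) : String :=
  String.ofList (value.toList.foldl pvStepA ([], true)).1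

-- ===== PORT B =====
-- p[:1].upper() + p[1:]
def pvCapSeg (p : List Char) : List Char :=
  PySem.Chars.upper (PySem.List.slice p none (some 1)) ++ PySem.List.slice p (some 1) none

-- "".join(p[:1].upper() + p[1:] for p in value.split("_")); value.split("_") is List.splitOn '_'
def to_pascal_case_alt (value : String) : String :=
  String.ofList (PySem.Chars.join [] ((value.toList.splitOn '_').map pvCapSeg))

-- ===== PRECONDITION & SPEC =====
def Spec_to_pascal_case (value : String) (out : String) : Prop := out = to_pascal_case_alt value
instance (value : String) (out : String) : Decidable (Spec_to_pascal_case value out) := by unfold Spec_to_pascal_case; infer_instance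

-- ===== CLAIM (what is proved, stated in full; the proofs are below) =====
def Claim_equal_to_pascal_case : Prop := ∀ (value : String), Dom_to_pascal_case value → Spec_to_pascal_case value (to_pascal_case value)

-- ===== LEMMAS AND PROOFS =====

-- recursive model of A's loop (first component of the foldl state)
def pvLoop : List Char → Bool → List Char
  | [], _ => []
  | c :: cs, b =>
    if c = '_' then pvLoop cs true
    else (if b then [PySem.Chars.upperChar c] else [c]) ++ pvLoop cs false

theorem pvFoldA_eq (cs : List Char) (acc : List Char) (b : Bool) :
    (cs.foldl pvStepA (acc, b)).1 = acc ++ pvLoop cs b := by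
  induction cs generalizing acc b with
  | nil => simp [pvLoop]
  | cons c cs ih =>
    by_cases hc : c = '_'
    · simp [List.foldl_cons, pvStepA, hc, pvLoop, ih]
    · cases b <;>
        simp [List.foldl_cons, pvStepA, hc, pvLoop, ih, PySem.Chars.upper]

theorem pvJoin_nil_flatten (l : List (List Char)) :
    PySem.Chars.join [] l = l.flatten := by
  induction l with
  | nil => simp [PySem.Chars.join_nil]
  | cons a t ih =>
    cases t with
    | nil => simp [PySem.Chars.join_singleton]
    | cons b t => simp [PySem.Chars.join_cons_cons, ih]

theorem pvCapSeg_nil : pvCapSeg [] = [] := by decide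

theorem pvCapSeg_cons (c : Char) (p : List Char) :
    pvCapSeg (c :: p) = PySem.Chars.upperChar c :: p := by
  simp [pvCapSeg, PySem.Chars.upper, pysem]

-- B's value with the FIRST segment left uncapitalized (what A's loop computes with the flag down)
def pvTailCap (cs : List Char) : List Char :=
  match List.splitOnP (· == '_') cs with
  | [] => []
  | h :: t => h ++ (t.map pvCapSeg).flatten

theorem pvLoop_spec (cs : List Char) :
    pvLoop cs true = ((List.splitOnP (· == '_') cs).map pvCapSeg).flatten ∧
      pvLoop cs false = pvTailCap cs := by
  induction cs with
  | nil => simp [pvLoop, pvTailCap, List.splitOnP_nil, pvCapSeg_nil]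
  | cons c cs ih =>
    obtain ⟨ih₁, ih₂⟩ := ih
    by_cases hc : c = '_'
    · constructor <;>
        simp [pvLoop, hc, List.splitOnP_cons, pvTailCap, pvCapSeg_nil, ih₁]
    · obtain ⟨h, t, hsp⟩ : ∃ h t, List.splitOnP (· == '_') cs = h :: t := by
        rcases e : List.splitOnP (· == '_') cs with _ | ⟨h, t⟩
        · exact absurd e (List.splitOnP_ne_nil _ _)
        · exact ⟨h, t, rfl⟩
      constructor
      · simp [pvLoop, hc, List.splitOnP_cons, hsp, pvCapSeg_cons]
        simpa [pvTailCap, hsp] using ih₂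
      · simp [pvLoop, hc, List.splitOnP_cons, pvTailCap, hsp]
        simpa [pvTailCap, hsp] using ih₂

-- ===== VERDICT (by name: the statement is the Claim_ definition above) =====
theorem to_pascal_case_spec : Claim_equal_to_pascal_case := by
  intro value _
  unfold Spec_to_pascal_case to_pascal_case to_pascal_case_alt
  rw [pvFoldA_eq, List.nil_append, (pvLoop_spec value.toList).1,
      pvJoin_nil_flatten, List.splitOn]
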